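-- pv_equiv track=rewrite | github.com/chuli83you-cloud/charls_Jeong | app.py | pick_support_sentences
-- ===== SOURCE A (Python) =====
-- def pick_support_sentences(sentences, topic: str, k: int = 3):
--     scored = []
--     for s in sentences:
--         score = s.lower().count(topic.lower())
--         if score:
--             scored.append((score, s))
--     scored.sort(key=lambda x: x[0], reverse=True)
--     selected = [s for _, s in scored[:k]]
--     if len(selected) < k:
--         for s in sentences:
--             if s not in selected:
--                 selected.append(s)
--             if len(selected) == k:
--                 break
--     return selected
-- ===== SOURCE B (Python) =====
-- def pick_support_sentences(sentences, topic: str, k: int = 3):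
--     t = topic.lower()
--     scores = [s.lower().count(t) for s in sentences]
--     levels = sorted({c for c in scores if c}, reverse=True)
--     selected = [s for lv in levels for s, c in zip(sentences, scores) if c == lv][:k]
--     if len(selected) < k:
--         for s in sentences:
--             if s not in selected:
--                 selected.append(s)
--             if len(selected) == k:
--                 break
--     return selected
-- ===== Notes on version B (the rewrite author's own statement) =====
-- stated objective: alternative
-- what changed: Replaces A's stable sort of (score, sentence) pairs with a bucket decomposition: score each sentence once, collect the distinct positive scores, sort only those, and flatten the buckets in descending score order (original order within each bucket); the fill loop is unchanged.
import Mathlib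
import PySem

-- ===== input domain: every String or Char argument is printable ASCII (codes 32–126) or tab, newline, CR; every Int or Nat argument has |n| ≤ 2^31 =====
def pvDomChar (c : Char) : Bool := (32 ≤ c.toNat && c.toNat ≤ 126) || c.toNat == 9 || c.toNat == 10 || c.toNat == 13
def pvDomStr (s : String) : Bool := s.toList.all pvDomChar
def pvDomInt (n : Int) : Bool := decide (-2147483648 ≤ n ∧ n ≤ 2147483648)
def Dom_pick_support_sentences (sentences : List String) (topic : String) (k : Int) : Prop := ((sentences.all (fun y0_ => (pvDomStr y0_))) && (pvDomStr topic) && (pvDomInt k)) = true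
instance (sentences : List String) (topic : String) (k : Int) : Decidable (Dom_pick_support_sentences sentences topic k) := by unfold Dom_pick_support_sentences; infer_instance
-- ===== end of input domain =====

-- B groups sentences by score and flattens the distinct scores in descending order instead of
-- stably sorting (score, sentence) pairs; same return value, alternative decomposition (not faster).

-- Shared helper: both Pythons contain the IDENTICAL fill loop
-- 'for s in sentences: if s not in selected: selected.append(s); if len(selected)==k: break'.
def pvFill (k : Int) : List String → List String → List String
  | sel, [] => sel
  | sel, s :: rest =>
      let sel' := if sel.contains s then sel else sel ++ [s]
      if (sel'.length : Int) = k then sel' else pvFill k sel' rest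

-- ===== PORT A =====
def pick_support_sentences (sentences : List String) (topic : String) (k : Int) : List String :=
  let scored : List (Int × String) :=
    sentences.foldl (fun acc s =>
      let score := PySem.Str.count (PySem.Str.lower s) (PySem.Str.lower topic)
      if score != 0 then acc ++ [((score : Int), s)] else acc) []
  let scoredSorted := PySem.List.sorted scored (fun x => x.1) true
  let selected := (PySem.List.slice scoredSorted none (some k)).map (fun p => p.2)
  if (selected.length : Int) < k then pvFill k selected sentences else selected

-- ===== PORT B =====
def pick_support_sentences_alt (sentences : List String) (topic : String) (k : Int) : List String :=
  let t := PySem.Str.lower topic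
  let scores : List Int := sentences.map (fun s => (PySem.Str.count (PySem.Str.lower s) t : Int))
  let levels := PySem.List.sorted (PySem.Set.ofList (scores.filter (fun c => c != 0))) (fun x => x) true
  let picked := levels.flatMap (fun lv =>
    ((sentences.zip scores).filter (fun p => p.2 == lv)).map (fun p => p.1))
  let selected := PySem.List.slice picked none (some k)
  if (selected.length : Int) < k then pvFill k selected sentences else selected

-- ===== PRECONDITION & SPEC =====
def Spec_pick_support_sentences (sentences : List String) (topic : String) (k : Int) (out : List String) : Prop := out = pick_support_sentences_alt sentences topic k
instance (sentences : List String) (topic : String) (k : Int) (out : List String) : Decidable (Spec_pick_support_sentences sentences topic k out) := by unfold Spec_pick_support_sentences; infer_instance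

-- ===== CLAIM (what is proved, stated in full; the proofs are below) =====
def Claim_equal_pick_support_sentences : Prop := ∀ (sentences : List String) (topic : String) (k : Int), Dom_pick_support_sentences sentences topic k → Spec_pick_support_sentences sentences topic k (pick_support_sentences sentences topic k)

-- ===== LEMMAS AND PROOFS =====

theorem pv_slice_map {α β : Type} (f : α → β) (xs : List α) (k : Int) :
    (PySem.List.slice xs none (some k)).map f = PySem.List.slice (xs.map f) none (some k) := by
  simp [PySem.List.slice, List.map_take, PySem.List.clampIdx]

theorem pv_insertBy_nil {α : Type} (before : α → α → Bool) (x : α) :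
    PySem.List.insertBy before x [] = [x] := rfl

theorem pv_insertBy_cons_pos {α : Type} (before : α → α → Bool) (x y : α) (ys : List α)
    (h : before x y = true) : PySem.List.insertBy before x (y :: ys) = x :: y :: ys := by
  simp [PySem.List.insertBy, h]

theorem pv_insertBy_cons_neg {α : Type} (before : α → α → Bool) (x y : α) (ys : List α)
    (h : before x y = false) :
    PySem.List.insertBy before x (y :: ys) = y :: PySem.List.insertBy before x ys := by
  simp [PySem.List.insertBy, h]

theorem pv_insertBy_skip {α : Type} (before : α → α → Bool) (x : α) (as bs : List α)
    (h : ∀ a ∈ as, before x a = false) :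
    PySem.List.insertBy before x (as ++ bs) = as ++ PySem.List.insertBy before x bs := by
  induction as with
  | nil => simp
  | cons a t ih =>
      simp only [List.cons_append]
      rw [pv_insertBy_cons_neg _ _ _ _ (h a (by simp))]
      simp [ih (fun a ha => h a (by simp [ha]))]

theorem pv_flatMap_congr {α β : Type} (l : List α) (f g : α → List β)
    (h : ∀ a ∈ l, f a = g a) : l.flatMap f = l.flatMap g := by
  induction l with
  | nil => rfl
  | cons a t ih => simp [List.flatMap_cons, h a (by simp), ih (fun a ha => h a (by simp [ha]))]

-- inserting x into the descending bucket flattening appends it at the end of its bucket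
theorem pv_insert_flat {α : Type} (key : α → Int) (x : α) (seen : List α) :
    ∀ (ds : List Int), ds.Pairwise (fun a b => b < a) → key x ∈ ds →
    PySem.List.insertBy (fun a b => decide (key b < key a)) x
        (ds.flatMap (fun d => seen.filter (fun y => key y == d)))
      = ds.flatMap (fun d => (seen ++ [x]).filter (fun y => key y == d)) := by
  intro ds
  induction ds with
  | nil => intro _ h; simp at h
  | cons d ds' ih =>
      intro hpw hmem
      have hpw' := (List.pairwise_cons.mp hpw).2
      have hlt : ∀ b ∈ ds', b < d := (List.pairwise_cons.mp hpw).1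
      simp only [List.flatMap_cons]
      have hfilters : ∀ y ∈ seen.filter (fun y => key y == d), key y = d := by
        intro y hy
        have := List.of_mem_filter hy
        simpa using this
      by_cases hx : key x = d
      · -- x belongs to the head bucket: it is appended right after it
        have hskip : ∀ a ∈ seen.filter (fun y => key y == d),
            (fun a b => decide (key b < key a)) x a = false := by
          intro a ha
          simp [hfilters a ha, hx]
        rw [pv_insertBy_skip _ _ _ _ hskip]
        have hrest : PySem.List.insertBy (fun a b => decide (key b < key a)) x
            (ds'.flatMap (fun d => seen.filter (fun y => key y == d)))
            = x :: ds'.flatMap (fun d => seen.filter (fun y => key y == d)) := by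
          cases hr : ds'.flatMap (fun d => seen.filter (fun y => key y == d)) with
          | nil => simp [pv_insertBy_nil]
          | cons r rs =>
              have hrm : r ∈ ds'.flatMap (fun d => seen.filter (fun y => key y == d)) := by
                simp [hr]
              obtain ⟨d', hd', hrf⟩ := List.mem_flatMap.mp hrm
              have hkr : key r = d' := by simpa using List.of_mem_filter hrf
              have : key r < key x := by rw [hkr, hx]; exact hlt d' hd'
              rw [pv_insertBy_cons_pos _ _ _ _ (by simpa using this)]
        rw [hrest]
        have hnotin : ∀ d' ∈ ds', (seen ++ [x]).filter (fun y => key y == d')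
            = seen.filter (fun y => key y == d') := by
          intro d' hd'
          have : key x ≠ d' := by rw [hx]; exact ne_of_gt (hlt d' hd')
          simp [List.filter_append, this]
        rw [pv_flatMap_congr ds' _ _ hnotin]
        simp [List.filter_append, hx]
      · -- x belongs to a later bucket: skip the head bucket entirely
        have hxm : key x ∈ ds' := by
          rcases List.mem_cons.mp hmem with h | h
          · exact absurd h hx
          · exact h
        have hxlt : key x < d := hlt _ hxm
        have hskip : ∀ a ∈ seen.filter (fun y => key y == d),
            (fun a b => decide (key b < key a)) x a = false := by
          intro a ha
          simp [hfilters a ha]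
          omega
        rw [pv_insertBy_skip _ _ _ _ hskip, ih hpw' hxm]
        have : (seen ++ [x]).filter (fun y => key y == d) = seen.filter (fun y => key y == d) := by
          simp [List.filter_append, hx]
        rw [this]

theorem pv_flat_foldl {α : Type} (key : α → Int) (ds : List Int)
    (hds : ds.Pairwise (fun a b => b < a)) :
    ∀ (xs seen : List α), (∀ x ∈ xs, key x ∈ ds) →
    xs.foldl (fun acc x => PySem.List.insertBy (fun a b => decide (key b < key a)) x acc)
        (ds.flatMap (fun d => seen.filter (fun y => key y == d)))
      = ds.flatMap (fun d => (seen ++ xs).filter (fun y => key y == d)) := by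
  intro xs
  induction xs with
  | nil => intro seen _; simp
  | cons x t ih =>
      intro seen hmem
      simp only [List.foldl_cons]
      rw [pv_insert_flat key x seen ds hds (hmem x (by simp))]
      have := ih (seen ++ [x]) (fun y hy => hmem y (by simp [hy]))
      simpa using this

-- stable descending sort = flattening the buckets of a strictly descending key list
theorem pv_flat_sorted {α : Type} (key : α → Int) (ds : List Int) (xs : List α)
    (hds : ds.Pairwise (fun a b => b < a)) (hmem : ∀ x ∈ xs, key x ∈ ds) :
    PySem.List.sorted xs key true = ds.flatMap (fun d => xs.filter (fun y => key y == d)) := by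
  rw [PySem.List.sorted_rev_eq_foldl_insertBy]
  have h0 : (ds.flatMap (fun d => ([] : List α).filter (fun y => key y == d))) = [] := by simp
  have := pv_flat_foldl key ds hds xs [] hmem
  rw [h0] at this
  simpa using this

theorem pv_zip_map {α β : Type} (l : List α) (g : α → β) :
    l.zip (l.map g) = l.map (fun a => (a, g a)) := by
  induction l with
  | nil => rfl
  | cons a t ih => simp [ih]

-- per bucket, A's (score, s) pairs and B's (s, score) zip pick the same sentences
theorem pv_perlevel (sentences : List String) (cnt : String → Nat) (lv : Int) (hlv : lv ≠ 0) :
    (((sentences.filter (fun s => cnt s != 0)).map (fun s => ((cnt s : Int), s))).filter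
        (fun y => y.1 == lv)).map (fun p => p.2)
      = ((sentences.map (fun s => (s, (cnt s : Int)))).filter (fun p => p.2 == lv)).map
        (fun p => p.1) := by
  induction sentences with
  | nil => rfl
  | cons s t ih =>
      by_cases h0 : cnt s = 0
      · have : ((0 : Int) == lv) = false := by simpa using (Ne.symm hlv)
        simp [h0, this, ih]
      · by_cases hl : (cnt s : Int) = lv
        · simp [h0, hl, ih]
        · have : (((cnt s : Int)) == lv) = false := by simpa using hl
          simp [h0, this, ih]

-- ===== VERDICT (by name: the statement is the Claim_ definition above) =====
theorem pick_support_sentences_spec : Claim_equal_pick_support_sentences := by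
  intro sentences topic k _
  unfold Spec_pick_support_sentences pick_support_sentences pick_support_sentences_alt
  simp only []
  set cnt := fun s => PySem.Str.count (PySem.Str.lower s) (PySem.Str.lower topic) with hcnt
  have hscored : sentences.foldl (fun acc s =>
      let score := PySem.Str.count (PySem.Str.lower s) (PySem.Str.lower topic)
      if score != 0 then acc ++ [((score : Int), s)] else acc) []
      = (sentences.filter (fun s => cnt s != 0)).map (fun s => ((cnt s : Int), s)) := by
    exact PySem.List.foldl_append_if (fun s => cnt s != 0)
      (fun s => ((cnt s : Int), s)) sentences []
  set scores := sentences.map (fun s => ((cnt s : Int))) with hscores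
  set levels := PySem.List.sorted (PySem.Set.ofList (scores.filter (fun c => c != 0)))
      (fun x => x) true with hlevels
  have hlv_mem : ∀ lv ∈ levels, lv ≠ 0 := by
    intro lv hlv
    have h1 : lv ∈ PySem.Set.ofList (scores.filter (fun c => c != 0)) :=
      (PySem.List.mem_sorted _ _ _ _).mp hlv
    have h2 : lv ∈ scores.filter (fun c => c != 0) := (PySem.Set.mem_ofList _ _).mp h1
    have := List.of_mem_filter h2
    simpa using this
  have hds : levels.Pairwise (fun a b => b < a) := by
    have h1 := PySem.List.sorted_pairwise_rev (PySem.Set.ofList (scores.filter (fun c => c != 0)))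
      (fun x => x)
    have hnd : levels.Nodup := by
      have hp := PySem.List.sorted_perm (PySem.Set.ofList (scores.filter (fun c => c != 0)))
        (fun x => x) true
      exact hp.nodup_iff.mpr (PySem.Set.nodup_ofList _)
    exact (h1.and hnd).imp (fun h => lt_of_le_of_ne h.1 (Ne.symm h.2))
  have hmem : ∀ x ∈ (sentences.filter (fun s => cnt s != 0)).map (fun s => ((cnt s : Int), s)),
      (fun (y : Int × String) => y.1) x ∈ levels := by
    intro x hx
    obtain ⟨s, hs, rfl⟩ := List.mem_map.mp hx
    have hs1 : s ∈ sentences := List.mem_of_mem_filter hs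
    have hs2 : cnt s ≠ 0 := by simpa using List.of_mem_filter hs
    have hmemf : ((cnt s : Int)) ∈ scores.filter (fun c => c != 0) := by
      apply List.mem_filter.mpr
      constructor
      · exact List.mem_map.mpr ⟨s, hs1, rfl⟩
      · simpa using hs2
    exact (PySem.List.mem_sorted _ _ _ _).mpr ((PySem.Set.mem_ofList _ _).mpr hmemf)
  rw [hscored]
  have hflat := pv_flat_sorted (fun (y : Int × String) => y.1) levels
    ((sentences.filter (fun s => cnt s != 0)).map (fun s => ((cnt s : Int), s))) hds hmem
  rw [pv_slice_map, hflat, List.map_flatMap]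
  have hz : sentences.zip scores = sentences.map (fun s => (s, (cnt s : Int))) := by
    rw [hscores]; exact pv_zip_map sentences _
  rw [hz]
  rw [pv_flatMap_congr levels _ _ (fun lv hlv => pv_perlevel sentences cnt lv (hlv_mem lv hlv))]
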